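-- pv_equiv track=rewrite | github.com/TBrsx/Vertex-Cover | graphes.py | del_vertice
-- ===== SOURCE A (Python) =====
-- def del_vertice(G, v):
--
--     Gfiltered = G.copy()
--     if v in Gfiltered:
--         removed = Gfiltered.pop(v)
--         for vertice in removed:
--             Gfiltered[vertice] = list(filter(v.__ne__, Gfiltered[vertice]))
--             if not Gfiltered[vertice]:
--                     Gfiltered.pop(vertice)
--     return Gfiltered
-- ===== SOURCE B (Python) =====
-- def del_vertice(G, v):
--     removed = G.get(v, [])
--     out = {}
--     for k, nbrs in G.items():
--         if k == v:
--             continue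
--         if k in removed:
--             filtered = [x for x in nbrs if x != v]
--             if filtered:
--                 out[k] = filtered
--         else:
--             out[k] = nbrs
--     return out
-- ===== Notes on version B (the rewrite author's own statement) =====
-- stated objective: simpler
-- what changed: B builds the result dict from scratch in one pass over G's items (skip v, filter rows of v's neighbours, keep the rest), instead of A's copy-then-mutate sequence of pop/reassign/pop per removed neighbour.
-- outside the precondition, e.g. on del_vertice({1: [2, 2], 2: [1, 3]}, 1): A returns {2: [3]}, B returns {2: [3]}
import Mathlib
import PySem

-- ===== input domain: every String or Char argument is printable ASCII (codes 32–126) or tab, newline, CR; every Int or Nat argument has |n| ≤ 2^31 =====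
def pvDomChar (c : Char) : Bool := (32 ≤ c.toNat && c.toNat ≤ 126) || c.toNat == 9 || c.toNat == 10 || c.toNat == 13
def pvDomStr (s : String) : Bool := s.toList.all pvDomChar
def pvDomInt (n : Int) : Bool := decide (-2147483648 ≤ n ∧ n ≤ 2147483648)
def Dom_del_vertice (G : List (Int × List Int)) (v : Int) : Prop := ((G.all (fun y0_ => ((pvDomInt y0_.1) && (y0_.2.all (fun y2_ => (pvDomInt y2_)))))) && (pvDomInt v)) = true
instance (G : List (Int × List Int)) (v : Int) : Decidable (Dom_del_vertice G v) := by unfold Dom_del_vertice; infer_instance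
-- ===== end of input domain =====

-- B builds the result dict in one pass over G's items instead of A's copy-then-mutate
-- (pop v, reassign each removed neighbour's row, pop it when empty); same return value on Pre_.


-- ===== PORT A =====
-- list(filter(v.__ne__, xs))
def pvFilterNe (v : Int) (xs : List Int) : List Int := xs.filter (fun x => x != v)

-- one iteration of A's for-loop body: Gfiltered[vertice] = filtered row; read it back; pop if empty.
-- (Python's Gfiltered[vertice] read raises KeyError when vertice is missing; that input is outside
--  Pre_del_vertice, the port uses getD [] there.)
def pvStepA (v : Int) (d : PySem.Dict Int (List Int)) (u : Int) : PySem.Dict Int (List Int) :=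
  if (d.insert u (pvFilterNe v (d.getD u []))).getD u [] = ([] : List Int)
  then (d.insert u (pvFilterNe v (d.getD u []))).erase u
  else d.insert u (pvFilterNe v (d.getD u []))

def del_vertice (G : List (Int × List Int)) (v : Int) : List (Int × List Int) :=
  let Gf := PySem.Dict.mk G
  if Gf.contains v then
    let removed := Gf.getD v []
    (removed.foldl (pvStepA v) (Gf.erase v)).items
  else Gf.items

-- ===== PORT B =====
def del_vertice_alt (G : List (Int × List Int)) (v : Int) : List (Int × List Int) :=
  let removed := (PySem.Dict.mk G).getD v []
  G.foldr (fun kn acc =>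
    if kn.1 = v then acc
    else if kn.1 ∈ removed then
      (let f := kn.2.filter (fun x => x != v)
       if f = [] then acc else (kn.1, f) :: acc)
    else kn :: acc) []

-- ===== PRECONDITION & SPEC =====
-- Pre_ excludes (a) association lists with duplicate keys (they do not represent a Python dict),
-- and (b) graphs where v's neighbour list contains v itself, a key not present in G, or a duplicate:
-- on a self-loop or missing neighbour A raises KeyError, and on duplicates A may raise KeyError when
-- reprocessing an already-popped row (the benign duplicate cases where A still returns agree with B
-- and are excluded only because the same closed-form condition covers the raising ones — see cite).
def Pre_del_vertice (G : List (Int × List Int)) (v : Int) : Prop :=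
  (G.map Prod.fst).Nodup ∧
  ∀ removed ∈ ((PySem.Dict.mk G).get? v).toList,
    removed.Nodup ∧ ∀ u ∈ removed, u ≠ v ∧ u ∈ G.map Prod.fst
instance (G : List (Int × List Int)) (v : Int) : Decidable (Pre_del_vertice G v) := by
  unfold Pre_del_vertice; infer_instance

def pvWitness_del_vertice : (List (Int × List Int)) × Int := ([(1, [2]), (2, [1])], 1)

def Spec_del_vertice (G : List (Int × List Int)) (v : Int) (out : List (Int × List Int)) : Prop := out = del_vertice_alt G v
instance (G : List (Int × List Int)) (v : Int) (out : List (Int × List Int)) : Decidable (Spec_del_vertice G v out) := by unfold Spec_del_vertice; infer_instance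

-- ===== CLAIM (what is proved, stated in full; the proofs are below) =====
def Claim_equal_del_vertice : Prop := ∀ (G : List (Int × List Int)) (v : Int), Dom_del_vertice G v → Pre_del_vertice G v → Spec_del_vertice G v (del_vertice G v)

-- ===== LEMMAS AND PROOFS =====

-- the row transformation A's loop over R applies, as a filterMap
def Ffm (v : Int) (R : List Int) (kn : Int × List Int) : Option (Int × List Int) :=
  if kn.1 ∈ R then (if pvFilterNe v kn.2 = [] then none else some (kn.1, pvFilterNe v kn.2)) else some kn

lemma Ffm_fst (v : Int) (R : List Int) (kn r : Int × List Int) (h : Ffm v R kn = some r) :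
    r.1 = kn.1 := by
  unfold Ffm at h
  split_ifs at h
  all_goals first
    | exact Option.noConfusion h
    | (injection h with h'; rw [← h'])

lemma filterMap_fst_sublist {α : Type} (F : Int × α → Option (Int × α)) (L : List (Int × α))
    (h : ∀ kn r, F kn = some r → r.1 = kn.1) :
    ((L.filterMap F).map Prod.fst).Sublist (L.map Prod.fst) := by
  induction L with
  | nil => simp
  | cons kn L' ih =>
    rw [List.filterMap_cons]
    cases hF : F kn with
    | none => exact ih.trans (List.sublist_cons_self _ _)
    | some r =>
      simp only [List.map_cons]
      rw [h kn r hF]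
      exact List.Sublist.cons₂ _ ih

lemma map_filter_eq_filterMap {α β : Type} (g : α → β) (q : β → Bool) (L : List α) :
    (L.map g).filter q = L.filterMap (fun a => if q (g a) then some (g a) else none) := by
  induction L with
  | nil => rfl
  | cons a L' ih =>
    rw [List.map_cons, List.filter_cons, List.filterMap_cons]
    by_cases h : q (g a)
    · rw [if_pos h, if_pos h, ih]
    · rw [if_neg h, if_neg h, ih]

lemma map_eq_filterMap {α β : Type} (g : α → β) (L : List α) :
    L.map g = L.filterMap (fun a => some (g a)) := by
  induction L with
  | nil => rfl
  | cons a L' ih => rw [List.map_cons, List.filterMap_cons, ih]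

lemma filter_filterMap {α β : Type} (q : α → Bool) (F : α → Option β) (L : List α) :
    (L.filter q).filterMap F = L.filterMap (fun a => if q a then F a else none) := by
  induction L with
  | nil => rfl
  | cons a L' ih =>
    rw [List.filter_cons, List.filterMap_cons]
    by_cases h : q a
    · rw [if_pos h, if_pos h, List.filterMap_cons, ih]
    · rw [if_neg h, if_neg h, ih]

lemma stepA_items (v u : Int) (L : List (Int × List Int))
    (hnd : (L.map Prod.fst).Nodup) (hu : u ∈ L.map Prod.fst) :
    (pvStepA v (PySem.Dict.mk L) u).items = L.filterMap (Ffm v [u]) := by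
  obtain ⟨p0, hp0, hfst⟩ := List.mem_map.mp hu
  have hndk : (PySem.Dict.mk L).keys.Nodup := hnd
  have hcont : (PySem.Dict.mk L).contains u = true := by
    simp only [PySem.Dict.contains, List.any_eq_true]
    exact ⟨p0, hp0, by simp [hfst]⟩
  have hget : (PySem.Dict.mk L).get? u = some p0.2 := by
    refine PySem.Dict.get?_of_mem_items _ ?_ hndk
    show (u, p0.2) ∈ L
    rw [← hfst]; exact hp0
  have hval : (PySem.Dict.mk L).getD u [] = p0.2 := by
    simp [PySem.Dict.getD, hget]
  have huniq : ∀ p ∈ L, p.1 = u → p.2 = p0.2 := by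
    intro p hp hpu
    have h2 : (PySem.Dict.mk L).get? u = some p.2 := by
      refine PySem.Dict.get?_of_mem_items _ ?_ hndk
      show (u, p.2) ∈ L
      rw [← hpu]; exact hp
    rw [hget] at h2; exact (Option.some.injEq _ _ ▸ h2).symm
  have hins : ((PySem.Dict.mk L).insert u (pvFilterNe v p0.2)).items
      = L.map (fun p => if p.1 == u then (u, pvFilterNe v p0.2) else p) :=
    PySem.Dict.items_insert_of_contains _ _ hcont
  have hgd2 : ((PySem.Dict.mk L).insert u (pvFilterNe v p0.2)).getD u [] = pvFilterNe v p0.2 :=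
    PySem.Dict.getD_insert_self _ _ _ _
  unfold pvStepA
  rw [hval, hgd2]
  by_cases hwnil : pvFilterNe v p0.2 = []
  · rw [if_pos hwnil]
    show (((PySem.Dict.mk L).insert u (pvFilterNe v p0.2)).items.filter
        (fun p => !(p.1 == u))) = _
    rw [hins, map_filter_eq_filterMap]
    apply List.filterMap_congr
    intro p hp
    by_cases hpu : p.1 = u
    · have : p.2 = p0.2 := huniq p hp hpu
      simp [Ffm, hpu, this, hwnil]
    · simp [Ffm, hpu]
  · rw [if_neg hwnil]
    show ((PySem.Dict.mk L).insert u (pvFilterNe v p0.2)).items = _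
    rw [hins, map_eq_filterMap]
    apply List.filterMap_congr
    intro p hp
    by_cases hpu : p.1 = u
    · have : p.2 = p0.2 := huniq p hp hpu
      simp [Ffm, hpu, this, hwnil]
    · simp [Ffm, hpu]

lemma foldA_items (v : Int) (R : List Int) : ∀ (L : List (Int × List Int)),
    (L.map Prod.fst).Nodup → R.Nodup → (∀ u ∈ R, u ∈ L.map Prod.fst) →
    (R.foldl (pvStepA v) (PySem.Dict.mk L)).items = L.filterMap (Ffm v R) := by
  induction R with
  | nil =>
    intro L _ _ _
    simp [Ffm]
  | cons u R' ih =>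
    intro L hnd hR hmem
    have hu : u ∈ L.map Prod.fst := hmem u (by simp)
    have hd : pvStepA v (PySem.Dict.mk L) u = PySem.Dict.mk (L.filterMap (Ffm v [u])) :=
      PySem.Dict.ext (stepA_items v u L hnd hu)
    have hsub := filterMap_fst_sublist (Ffm v [u]) L (Ffm_fst v [u])
    have hnotmem : u ∉ R' := (List.nodup_cons.mp hR).1
    have hnd' : ((L.filterMap (Ffm v [u])).map Prod.fst).Nodup := hsub.nodup hnd
    have hmems : ∀ u' ∈ R', u' ∈ (L.filterMap (Ffm v [u])).map Prod.fst := by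
      intro u' hu'
      have hne : u' ≠ u := fun h => hnotmem (h ▸ hu')
      obtain ⟨p, hp, hpf⟩ := List.mem_map.mp (hmem u' (by simp [hu']))
      apply List.mem_map.mpr
      refine ⟨p, List.mem_filterMap.mpr ⟨p, hp, ?_⟩, hpf⟩
      simp [Ffm, hpf ▸ hne]
    rw [List.foldl_cons, hd, ih (L.filterMap (Ffm v [u])) hnd' (List.nodup_cons.mp hR).2 hmems]
    rw [List.filterMap_filterMap]
    apply List.filterMap_congr
    intro kn _
    by_cases hk : kn.1 = u
    · by_cases hnil : pvFilterNe v kn.2 = []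
      · simp [Ffm, hk, hnil]
      · simp [Ffm, hk, hnil, hnotmem]
    · by_cases hmem' : kn.1 ∈ R' <;> simp [Ffm, hk, hmem']

lemma foldB_eq (v : Int) (removed : List Int) (L : List (Int × List Int)) :
    (L.foldr (fun kn acc =>
      if kn.1 = v then acc
      else if kn.1 ∈ removed then
        (let f := kn.2.filter (fun x => x != v)
         if f = [] then acc else (kn.1, f) :: acc)
      else kn :: acc) []) =
    L.filterMap (fun kn => if kn.1 = v then none else Ffm v removed kn) := by
  induction L with
  | nil => rfl
  | cons kn L' ih =>
    rw [List.foldr_cons, List.filterMap_cons, ih]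
    by_cases h1 : kn.1 = v
    · simp [h1]
    · by_cases h2 : kn.1 ∈ removed
      · by_cases h3 : kn.2.filter (fun x => x != v) = [] <;>
          simp [h1, h2, h3, Ffm, pvFilterNe]
      · simp [h1, h2, Ffm]

-- ===== VERDICT (by name: the statement is the Claim_ definition above) =====
theorem del_vertice_spec : Claim_equal_del_vertice := by
  intro G v _ hpre
  obtain ⟨hnd, hrest⟩ := hpre
  unfold Spec_del_vertice del_vertice del_vertice_alt
  rw [foldB_eq]
  cases hget : (PySem.Dict.mk G).get? v with
  | none =>
    have hcont : (PySem.Dict.mk G).contains v = false :=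
      (PySem.Dict.get?_eq_none_iff_contains _ _).mp hget
    rw [if_neg (by simp [hcont])]
    have hgd : (PySem.Dict.mk G).getD v [] = [] := by simp [PySem.Dict.getD, hget]
    rw [hgd]
    have hnov : v ∉ (PySem.Dict.mk G).keys :=
      (PySem.Dict.get?_eq_none_iff_not_mem_keys _ _).mp hget
    have hne : ∀ kn ∈ G, kn.1 ≠ v := by
      intro kn hkn h
      exact hnov (List.mem_map.mpr ⟨kn, hkn, h⟩)
    show G = _
    conv_lhs => rw [← List.filterMap_some (l := G)]
    apply List.filterMap_congr
    intro kn hkn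
    simp [hne kn hkn, Ffm]
  | some removed =>
    have hcont : (PySem.Dict.mk G).contains v = true := by
      rw [PySem.Dict.contains_eq_isSome_get?, hget]; rfl
    rw [if_pos hcont]
    have hgd : (PySem.Dict.mk G).getD v [] = removed := by simp [PySem.Dict.getD, hget]
    rw [hgd]
    obtain ⟨hRnd, hRmem⟩ := hrest removed (by simp [hget])
    have herase : (PySem.Dict.mk G).erase v
        = PySem.Dict.mk (G.filter (fun p => !(p.1 == v))) := rfl
    have hnd' : ((G.filter (fun p => !(p.1 == v))).map Prod.fst).Nodup :=
      (List.Sublist.map Prod.fst List.filter_sublist).nodup hnd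
    have hmems : ∀ u ∈ removed, u ∈ (G.filter (fun p => !(p.1 == v))).map Prod.fst := by
      intro u hu
      obtain ⟨hneu, humem⟩ := hRmem u hu
      obtain ⟨p, hp, hpf⟩ := List.mem_map.mp humem
      exact List.mem_map.mpr ⟨p, List.mem_filter.mpr ⟨hp, by simp [hpf, hneu]⟩, hpf⟩
    rw [herase, foldA_items v removed (G.filter (fun p => !(p.1 == v))) hnd' hRnd hmems]
    rw [filter_filterMap]
    apply List.filterMap_congr
    intro kn _
    by_cases hk : kn.1 = v
    · simp [hk]
    · simp [hk]
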